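-- pv_equiv track=rewrite | github.com/Hanalyx/OpenWatch | backend/app/services/engine/scanners/oscap.py | _parse_profiles_output
-- ===== SOURCE A (Python) =====
-- from typing import Any, Dict, List, Optional
--
-- def _parse_profiles_output(profiles_output: str) -> List[Dict[str, Any]]:
--     """
--     Parse oscap info --profiles output.
--
--     Args:
--         profiles_output: Raw output from oscap info --profiles.
--
--     Returns:
--         List of profile dictionaries.
--     """
--     profiles: List[Dict[str, Any]] = []
--     lines = profiles_output.split("\n")
--
--     current_profile: Optional[Dict[str, Any]] = None
--
--     for line in lines:
--         line = line.strip()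
--
--         if line.startswith("Profile ID:"):
--             # Save previous profile
--             if current_profile:
--                 profiles.append(current_profile)
--
--             # Start new profile
--             current_profile = {
--                 "id": line.split(":", 1)[1].strip(),
--                 "title": "",
--                 "description": "",
--             }
--
--         elif line.startswith("Title:") and current_profile:
--             current_profile["title"] = line.split(":", 1)[1].strip()
--
--         elif line.startswith("Description:") and current_profile:
--             current_profile["description"] = line.split(":", 1)[1].strip()
--
--     # Add last profile
--     if current_profile:
--         profiles.append(current_profile)
--
--     return profiles
-- ===== SOURCE B (Python) =====
-- from typing import Any, Dict, List
--
--
-- def _parse_profiles_output(profiles_output: str) -> List[Dict[str, Any]]: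
--     """Group the stripped lines into per-header blocks first, then map each block to a dict."""
--     lines = [l.strip() for l in profiles_output.split("\n")]
--
--     # Pass 1: partition into blocks, each starting with a "Profile ID:" header;
--     # lines before the first header are dropped.
--     blocks: List[List[str]] = []
--     for line in lines:
--         if line.startswith("Profile ID:"):
--             blocks.append([line])
--         elif blocks:
--             blocks[-1].append(line)
--
--     def value(line: str) -> str:
--         return line.split(":", 1)[1].strip()
--
--     # Pass 2: each block becomes one profile dict (last Title:/Description: wins).
--     def to_profile(block: List[str]) -> Dict[str, Any]:
--         title = ""
--         description = ""
--         for line in block[1:]: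
--             if line.startswith("Title:"):
--                 title = value(line)
--             elif line.startswith("Description:"):
--                 description = value(line)
--         return {"id": value(block[0]), "title": title, "description": description}
--
--     return [to_profile(b) for b in blocks]
-- ===== Notes on version B (the rewrite author's own statement) =====
-- stated objective: alternative
-- what changed: B replaces A's single-pass loop that mutates a current-profile dict with a two-pass decomposition: first group the stripped lines into per-header blocks (dropping pre-header lines), then map each block to its profile dict with last-wins Title/Description scanning.
import Mathlib
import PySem

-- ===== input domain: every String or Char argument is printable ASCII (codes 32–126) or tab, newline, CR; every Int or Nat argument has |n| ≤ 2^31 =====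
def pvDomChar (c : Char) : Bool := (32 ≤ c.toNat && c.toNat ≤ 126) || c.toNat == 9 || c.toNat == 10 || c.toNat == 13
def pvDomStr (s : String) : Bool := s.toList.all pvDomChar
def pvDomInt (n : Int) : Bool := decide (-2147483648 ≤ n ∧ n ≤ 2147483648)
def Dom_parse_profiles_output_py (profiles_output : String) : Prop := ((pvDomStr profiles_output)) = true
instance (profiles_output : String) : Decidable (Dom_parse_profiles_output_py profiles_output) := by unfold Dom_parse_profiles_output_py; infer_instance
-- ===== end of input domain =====

-- B groups stripped lines into per-header blocks first, then maps each block to a dict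
-- (two passes with an explicit block structure), instead of A's single pass that mutates
-- a current-profile dict; objective: alternative decomposition, same cost.


-- shared low-level helper: line.split(":", 1)[1].strip()  (both Pythons contain this expression
-- verbatim; the [1] index exists on every line the guards admit, .getD "" is never reached there)
def pvVal (line : String) : String :=
  PySem.Str.strip ((PySem.List.pyGet? ((PySem.Str.splitMax? line ":" 1).getD []) 1).getD "")

-- ===== PORT A =====
-- one iteration of A's for-loop: state = (profiles so far, current_profile)
def pvA_step (st : List (PySem.Dict String String) × Option (PySem.Dict String String))
    (raw : String) : List (PySem.Dict String String) × Option (PySem.Dict String String) :=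
  let line := PySem.Str.strip raw
  if PySem.Str.startswith line "Profile ID:" then
    ((match st.2 with | some p => st.1 ++ [p] | none => st.1),
     some (((PySem.Dict.empty.insert "id" (pvVal line)).insert "title" "").insert "description" ""))
  else if PySem.Str.startswith line "Title:" then
    (st.1, st.2.map (fun p => p.insert "title" (pvVal line)))   -- 'and current_profile': no-op on none
  else if PySem.Str.startswith line "Description:" then
    (st.1, st.2.map (fun p => p.insert "description" (pvVal line)))
  else st

-- A's trailing "if current_profile: profiles.append(current_profile)" and return
def pvA_finish (st : List (PySem.Dict String String) × Option (PySem.Dict String String)) :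
    List (List (String × String)) :=
  (match st.2 with | some p => st.1 ++ [p] | none => st.1).map PySem.Dict.items

def parse_profiles_output_py (profiles_output : String) : List (List (String × String)) :=
  pvA_finish (((PySem.Str.split? profiles_output "\n").getD []).foldl pvA_step ([], none))

-- ===== PORT B =====
-- pass 1 of Source B: blocks kept in reverse, each block as (header, body lines in reverse),
-- so Python's append-at-end is a cons here; read back with .reverse below.
def pvB_group (rbs : List (String × List String)) (line : String) : List (String × List String) :=
  if PySem.Str.startswith line "Profile ID:" then (line, []) :: rbs
  else match rbs with
    | [] => []                                   -- 'elif blocks:' false: drop the line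
    | (h, rb) :: t => (h, line :: rb) :: t       -- blocks[-1].append(line)

-- body of to_profile's for-loop: state = (title, description)
def pvB_field (td : String × String) (line : String) : String × String :=
  if PySem.Str.startswith line "Title:" then (pvVal line, td.2)
  else if PySem.Str.startswith line "Description:" then (td.1, pvVal line)
  else td

def pvB_toProfile (h : String) (body : List String) : List (String × String) :=
  let td := body.foldl pvB_field ("", "")
  [("id", pvVal h), ("title", td.1), ("description", td.2)]

def parse_profiles_output_py_alt (profiles_output : String) : List (List (String × String)) :=
  (((((PySem.Str.split? profiles_output "\n").getD []).map PySem.Str.strip).foldl pvB_group []).reverse).map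
    (fun p => pvB_toProfile p.1 p.2.reverse)

-- ===== PRECONDITION & SPEC =====
def Spec_parse_profiles_output_py (profiles_output : String) (out : List (List (String × String))) : Prop := out = parse_profiles_output_py_alt profiles_output
instance (profiles_output : String) (out : List (List (String × String))) : Decidable (Spec_parse_profiles_output_py profiles_output out) := by unfold Spec_parse_profiles_output_py; infer_instance

-- ===== CLAIM (what is proved, stated in full; the proofs are below) =====
def Claim_equal_parse_profiles_output_py : Prop := ∀ (profiles_output : String), Dom_parse_profiles_output_py profiles_output → Spec_parse_profiles_output_py profiles_output (parse_profiles_output_py profiles_output)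

-- ===== LEMMAS AND PROOFS =====

-- the dict A's loop carries, reconstructed from B's (header, reversed body) block
def pvDictOf (h : String) (rb : List String) : PySem.Dict String String :=
  PySem.Dict.mk [("id", pvVal h),
    ("title", (rb.reverse.foldl pvB_field ("", "")).1),
    ("description", (rb.reverse.foldl pvB_field ("", "")).2)]

-- B's reversed-blocks state, read as A's (profiles, current_profile) state
def pvConv (rbs : List (String × List String)) :
    List (PySem.Dict String String) × Option (PySem.Dict String String) :=
  match rbs with
  | [] => ([], none)
  | (h, rb) :: t => (t.reverse.map (fun p => pvDictOf p.1 p.2), some (pvDictOf h rb))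

theorem pv_items_dictOf (h : String) (rb : List String) :
    PySem.Dict.items (pvDictOf h rb) = pvB_toProfile h rb.reverse := by
  simp [pvDictOf, pvB_toProfile]

theorem pv_insert_title (i t d v : String) :
    (PySem.Dict.mk [("id", i), ("title", t), ("description", d)]).insert "title" v
      = PySem.Dict.mk [("id", i), ("title", v), ("description", d)] := by
  rfl

theorem pv_insert_desc (i t d v : String) :
    (PySem.Dict.mk [("id", i), ("title", t), ("description", d)]).insert "description" v
      = PySem.Dict.mk [("id", i), ("title", t), ("description", v)] := by
  rfl

theorem pv_init_dict (l : String) :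
    ((PySem.Dict.empty.insert "id" (pvVal l)).insert "title" "").insert "description" ""
      = pvDictOf l [] := by
  apply PySem.Dict.ext
  simp [PySem.Dict.items_insert, PySem.Dict.contains_insert, PySem.Dict.contains_mk,
    PySem.Dict.empty, pvDictOf]

theorem pv_dictOf_title (h l : String) (rb : List String)
    (hl : PySem.Str.startswith l "Title:" = true) :
    pvDictOf h (l :: rb) = (pvDictOf h rb).insert "title" (pvVal l) := by
  unfold pvDictOf
  rw [pv_insert_title]
  simp only [List.reverse_cons, List.foldl_append, List.foldl_cons, List.foldl_nil]
  unfold pvB_field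
  rw [if_pos hl]

theorem pv_dictOf_desc (h l : String) (rb : List String)
    (hl1 : ¬ PySem.Str.startswith l "Title:" = true)
    (hl2 : PySem.Str.startswith l "Description:" = true) :
    pvDictOf h (l :: rb) = (pvDictOf h rb).insert "description" (pvVal l) := by
  unfold pvDictOf
  rw [pv_insert_desc]
  simp only [List.reverse_cons, List.foldl_append, List.foldl_cons, List.foldl_nil]
  unfold pvB_field
  rw [if_neg hl1, if_pos hl2]

theorem pv_dictOf_skip (h l : String) (rb : List String)
    (hl1 : ¬ PySem.Str.startswith l "Title:" = true)
    (hl2 : ¬ PySem.Str.startswith l "Description:" = true) :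
    pvDictOf h (l :: rb) = pvDictOf h rb := by
  unfold pvDictOf
  simp only [List.reverse_cons, List.foldl_append, List.foldl_cons, List.foldl_nil]
  unfold pvB_field
  rw [if_neg hl1, if_neg hl2]

theorem pv_finish_conv (rbs : List (String × List String)) :
    pvA_finish (pvConv rbs) = rbs.reverse.map (fun p => pvB_toProfile p.1 p.2.reverse) := by
  cases rbs with
  | nil => rfl
  | cons hd t =>
    obtain ⟨h, rb⟩ := hd
    simp only [pvConv, pvA_finish, List.reverse_cons, List.map_append, List.map_map]
    rw [List.map_congr_left (fun p _ => pv_items_dictOf p.1 p.2)]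
    simp [pv_items_dictOf]

theorem pv_step_conv (rbs : List (String × List String)) (raw : String) :
    pvA_step (pvConv rbs) raw = pvConv (pvB_group rbs (PySem.Str.strip raw)) := by
  unfold pvA_step pvB_group
  by_cases h1 : PySem.Str.startswith (PySem.Str.strip raw) "Profile ID:" = true
  · rw [if_pos h1, if_pos h1, pv_init_dict]
    cases rbs with
    | nil => rfl
    | cons hd t =>
      obtain ⟨h, rb⟩ := hd
      simp [pvConv, List.map_append]
  · rw [if_neg h1, if_neg h1]
    by_cases h2 : PySem.Str.startswith (PySem.Str.strip raw) "Title:" = true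
    · rw [if_pos h2]
      cases rbs with
      | nil => rfl
      | cons hd t =>
        obtain ⟨h, rb⟩ := hd
        simp only [pvConv, Option.map_some]
        rw [pv_dictOf_title h _ rb h2]
    · rw [if_neg h2]
      by_cases h3 : PySem.Str.startswith (PySem.Str.strip raw) "Description:" = true
      · rw [if_pos h3]
        cases rbs with
        | nil => rfl
        | cons hd t =>
          obtain ⟨h, rb⟩ := hd
          simp only [pvConv, Option.map_some]
          rw [pv_dictOf_desc h _ rb h2 h3]
      · rw [if_neg h3]
        cases rbs with
        | nil => rfl
        | cons hd t =>
          obtain ⟨h, rb⟩ := hd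
          simp only [pvConv]
          rw [pv_dictOf_skip h _ rb h2 h3]

theorem pv_loop (raws : List String) (rbs : List (String × List String)) :
    pvA_finish (raws.foldl pvA_step (pvConv rbs))
      = ((raws.foldl (fun s r => pvB_group s (PySem.Str.strip r)) rbs).reverse).map
          (fun p => pvB_toProfile p.1 p.2.reverse) := by
  induction raws generalizing rbs with
  | nil => simpa using pv_finish_conv rbs
  | cons r rs ih =>
    simp only [List.foldl_cons, pv_step_conv]
    exact ih _

-- ===== VERDICT (by name: the statement is the Claim_ definition above) =====
theorem parse_profiles_output_py_spec : Claim_equal_parse_profiles_output_py := by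
  intro s _
  unfold Spec_parse_profiles_output_py parse_profiles_output_py parse_profiles_output_py_alt
  rw [List.foldl_map]
  exact pv_loop ((PySem.Str.split? s "\n").getD []) []
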